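-- pv_equiv track=rewrite | github.com/Bay-State-Pet-and-Garden-Supply/BayState | apps/scraper/tests/unit/test_golden_dataset_regression.py | is_major_retailer_domain
-- ===== SOURCE A (Python) =====
-- def is_major_retailer_domain(domain: str) -> bool:
--     """Check if domain is a known major retailer."""
--     major_retailers = {
--         "amazon.com",
--         "walmart.com",
--         "target.com",
--         "chewy.com",
--         "petco.com",
--         "petsmart.com",
--         "tractorsupply.com",
--         "homedepot.com",
--         "lowes.com",
--         "acehardware.com",
--         "costco.com",
--         "summitracing.com",
--         "ebay.com",
--     }
--     return any(domain == retailer or domain.endswith(f".{retailer}")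
--                for retailer in major_retailers)
-- ===== SOURCE B (Python) =====
-- _MAJOR_RETAILERS = {
--     "amazon.com",
--     "walmart.com",
--     "target.com",
--     "chewy.com",
--     "petco.com",
--     "petsmart.com",
--     "tractorsupply.com",
--     "homedepot.com",
--     "lowes.com",
--     "acehardware.com",
--     "costco.com",
--     "summitracing.com",
--     "ebay.com",
-- }
--
--
-- def is_major_retailer_domain(domain: str) -> bool:
--     """Check if domain is a known major retailer."""
--     labels = domain.split(".")
--     if len(labels) < 2:
--         return False
--     return ".".join(labels[-2:]) in _MAJOR_RETAILERS
-- ===== Notes on version B (the rewrite author's own statement) =====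
-- stated objective: simpler
-- what changed: Instead of scanning all 13 retailers with an exact-or-suffix test per retailer, B extracts the registrable key (the last two dot-separated labels joined with '.') once and does a single set-membership lookup.
import Mathlib
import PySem

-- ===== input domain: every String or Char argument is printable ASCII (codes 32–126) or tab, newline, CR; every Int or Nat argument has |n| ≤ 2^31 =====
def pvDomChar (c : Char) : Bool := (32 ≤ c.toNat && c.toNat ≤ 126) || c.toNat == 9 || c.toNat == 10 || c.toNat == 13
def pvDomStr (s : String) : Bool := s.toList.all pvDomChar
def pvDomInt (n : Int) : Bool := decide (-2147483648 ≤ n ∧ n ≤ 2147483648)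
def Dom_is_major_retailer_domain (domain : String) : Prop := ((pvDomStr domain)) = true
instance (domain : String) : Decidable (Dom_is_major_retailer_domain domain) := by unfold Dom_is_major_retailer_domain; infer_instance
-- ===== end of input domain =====

-- B derives the registrable key (last two dot-labels) once and does a single set lookup
-- instead of A's 13-way exact-or-suffix scan (objective: simpler).


-- ===== PORT A =====
def pvRetailersA : List String :=
  ["amazon.com", "walmart.com", "target.com", "chewy.com", "petco.com",
   "petsmart.com", "tractorsupply.com", "homedepot.com", "lowes.com",
   "acehardware.com", "costco.com", "summitracing.com", "ebay.com"]

-- Python iterates the set literal in hash order; `any` of pure tests is order-independent,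
-- so iterating the set in first-insertion order is exact.
def is_major_retailer_domain (domain : String) : Bool :=
  (PySem.Set.ofList pvRetailersA).any
    (fun retailer => domain == retailer || PySem.Str.endswith domain ("." ++ retailer))

-- ===== PORT B =====
def pvRetailersB : PySem.Set String :=
  PySem.Set.ofList
    ["amazon.com", "walmart.com", "target.com", "chewy.com", "petco.com",
     "petsmart.com", "tractorsupply.com", "homedepot.com", "lowes.com",
     "acehardware.com", "costco.com", "summitracing.com", "ebay.com"]

-- domain.split(".") with the nonempty literal separator is Chars.splitOn (exact);
-- ".".join(labels[-2:]) is Chars.join over the slice labels[-2:].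
def is_major_retailer_domain_alt (domain : String) : Bool :=
  let labels := PySem.Chars.splitOn domain.toList ['.']
  if labels.length < 2 then false
  else pvRetailersB.contains
    (String.ofList (PySem.Chars.join ['.'] (PySem.List.slice labels (some (-2)) none)))

-- ===== PRECONDITION & SPEC =====
def Spec_is_major_retailer_domain (domain : String) (out : Bool) : Prop := out = is_major_retailer_domain_alt domain
instance (domain : String) (out : Bool) : Decidable (Spec_is_major_retailer_domain domain out) := by unfold Spec_is_major_retailer_domain; infer_instance

-- ===== CLAIM (what is proved, stated in full; the proofs are below) =====
def Claim_equal_is_major_retailer_domain : Prop := ∀ (domain : String), Dom_is_major_retailer_domain domain → Spec_is_major_retailer_domain domain (is_major_retailer_domain domain)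

-- ===== LEMMAS AND PROOFS =====

-- PySem's fuelled splitOn with a single-char separator is Mathlib's List.splitOn.
lemma pvGoSingle (c : Char) : ∀ (fuel : Nat) (l cur : List Char) (acc : List (List Char)),
    l.length ≤ fuel →
    PySem.Chars.splitOn.go [c] fuel l cur acc =
      acc.reverse ++ (cur.reverse ++ (l.splitOn c).headI) :: (l.splitOn c).tail := by
  intro fuel
  induction fuel with
  | zero =>
    intro l cur acc h
    have hl : l = [] := List.eq_nil_of_length_eq_zero (Nat.le_zero.mp h)
    subst hl
    simp [PySem.Chars.splitOn.go, List.splitOn, List.splitOnP_nil]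
  | succ n ih =>
    intro l cur acc h
    cases l with
    | nil => simp [PySem.Chars.splitOn.go, List.splitOn, List.splitOnP_nil]
    | cons d rest =>
      obtain ⟨q, qs, hq⟩ := List.exists_cons_of_ne_nil (List.splitOnP_ne_nil (· == c) rest)
      have hlen : rest.length ≤ n := by simpa using h
      by_cases hd : d = c
      · subst hd
        have hgo : PySem.Chars.splitOn.go [d] (n+1) (d :: rest) cur acc =
            PySem.Chars.splitOn.go [d] n rest [] (cur.reverse :: acc) := by
          simp [PySem.Chars.splitOn.go, List.isPrefixOf]
        rw [hgo, ih rest [] (cur.reverse :: acc) hlen]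
        simp [List.splitOn, List.splitOnP_cons, hq]
      · have hgo : PySem.Chars.splitOn.go [c] (n+1) (d :: rest) cur acc =
            PySem.Chars.splitOn.go [c] n rest (d :: cur) acc := by
          have hd' : ¬ c = d := fun hcd => hd hcd.symm
          simp [PySem.Chars.splitOn.go, List.isPrefixOf, hd']
        rw [hgo, ih rest (d :: cur) acc hlen]
        simp [List.splitOn, List.splitOnP_cons, hq, hd]

lemma pvSplitOnSingle (cs : List Char) (c : Char) :
    PySem.Chars.splitOn cs [c] = cs.splitOn c := by
  obtain ⟨q, qs, hq⟩ := List.exists_cons_of_ne_nil (List.splitOnP_ne_nil (· == c) cs)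
  rw [PySem.Chars.splitOn, pvGoSingle c (cs.length + 1) cs [] [] (by omega)]
  simp [List.splitOn, hq]

-- splitting distributes over an occurrence of the separator
lemma pvSplitOnAppend (c : Char) : ∀ (a b : List Char),
    (a ++ c :: b).splitOn c = a.splitOn c ++ b.splitOn c := by
  intro a
  induction a with
  | nil => intro b; simp [List.splitOn, List.splitOnP_cons, List.splitOnP_nil]
  | cons d rest ih =>
    intro b
    have hih := ih b
    simp only [List.splitOn] at hih ⊢
    obtain ⟨q, qs, hq⟩ := List.exists_cons_of_ne_nil (List.splitOnP_ne_nil (· == c) rest)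
    by_cases hd : d = c
    · subst hd
      simp [List.splitOnP_cons, hih]
    · simp [List.splitOnP_cons, hd, hih, hq]

-- a separator-free list splits to itself
lemma pvSplitOnFree (c : Char) (l : List Char) (h : c ∉ l) : l.splitOn c = [l] := by
  rw [List.splitOn, List.splitOnP_eq_single]
  intro x hx
  simp only [beq_iff_eq]
  exact fun hxc => h (hxc ▸ hx)

lemma pvJoinPair (c : Char) (p q : List Char) :
    PySem.Chars.join [c] [p, q] = p ++ c :: q := by
  simp [PySem.Chars.join, List.intercalate]

lemma pvJoinAppendPair (c : Char) : ∀ (as : List (List Char)) (p q : List Char), as ≠ [] →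
    PySem.Chars.join [c] (as ++ [p, q]) = PySem.Chars.join [c] as ++ c :: (p ++ c :: q) := by
  intro as
  induction as with
  | nil => intro p q h; exact absurd rfl h
  | cons a as' ih =>
    intro p q _
    cases as' with
    | nil => simp [PySem.Chars.join, List.intercalate]
    | cons a2 as'' =>
      have ih' := ih p q (by simp)
      simp only [List.cons_append] at ih' ⊢
      rw [PySem.Chars.join_cons_cons, ih', PySem.Chars.join_cons_cons]
      simp

lemma pvJoinIntercalate (P : List (List Char)) :
    PySem.Chars.join ['.'] P = List.intercalate ['.'] P := rfl

-- the key characterisation: "cs equals x.y or ends with .x.y"  ⟺  "cs has ≥ 2 labels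
-- and its last two labels joined give x.y"   (x, y dot-free)
lemma pvKeyIff (cs x y : List Char) (hx : '.' ∉ x) (hy : '.' ∉ y) :
    (cs = x ++ '.' :: y ∨ ('.' :: (x ++ '.' :: y)) <:+ cs) ↔
    (2 ≤ (cs.splitOn '.').length ∧
     PySem.Chars.join ['.'] ((cs.splitOn '.').drop ((cs.splitOn '.').length - 2)) = x ++ '.' :: y) := by
  constructor
  · intro h
    rcases h with rfl | ⟨pre, hpre⟩
    · rw [pvSplitOnAppend, pvSplitOnFree _ _ hx, pvSplitOnFree _ _ hy]
      simp [pvJoinPair]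
    · subst hpre
      rw [pvSplitOnAppend, pvSplitOnAppend, pvSplitOnFree _ _ hx, pvSplitOnFree _ _ hy]
      have hne : (pre.splitOn '.').length ≠ 0 := by
        simpa using List.splitOnP_ne_nil (· == '.') pre
      constructor
      · simp only [List.length_append, List.length_cons, List.length_nil]
        omega
      · have hdrop : ((pre.splitOn '.' ++ ([x] ++ [y])).length - 2) = (pre.splitOn '.').length := by
          simp only [List.length_append, List.length_cons, List.length_nil]
          omega
        rw [hdrop, show pre.splitOn '.' ++ ([x] ++ [y]) = pre.splitOn '.' ++ [x, y] from by simp,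
          List.drop_left, pvJoinPair]
  · rintro ⟨hlen, hjoin⟩
    have hsplit : (cs.splitOn '.').take ((cs.splitOn '.').length - 2) ++
        (cs.splitOn '.').drop ((cs.splitOn '.').length - 2) = cs.splitOn '.' :=
      List.take_append_drop _ _
    have hlen2 : ((cs.splitOn '.').drop ((cs.splitOn '.').length - 2)).length = 2 := by
      rw [List.length_drop]; omega
    obtain ⟨p, q, hpq⟩ := List.length_eq_two.mp hlen2
    have hpq' : p ++ '.' :: q = x ++ '.' :: y := by
      rw [hpq, pvJoinPair] at hjoin; exact hjoin
    have hcs : cs = PySem.Chars.join ['.'] (cs.splitOn '.') := by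
      rw [pvJoinIntercalate, List.intercalate_splitOn]
    by_cases hF : (cs.splitOn '.').take ((cs.splitOn '.').length - 2) = []
    · left
      rw [hcs, ← hsplit, hF, List.nil_append, hpq, pvJoinPair, hpq']
    · right
      refine ⟨PySem.Chars.join ['.'] ((cs.splitOn '.').take ((cs.splitOn '.').length - 2)), ?_⟩
      conv_rhs => rw [hcs, ← hsplit, hpq]
      rw [pvJoinAppendPair _ _ _ _ hF, hpq']

-- every retailer is two dot-free labels around one dot
lemma pvShape : ∀ r ∈ pvRetailersA, ∃ x y : List Char,
    r.toList = x ++ '.' :: y ∧ '.' ∉ x ∧ '.' ∉ y := by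
  intro r hr
  fin_cases hr
  · exact ⟨"amazon".toList, "com".toList, by decide, by decide, by decide⟩
  · exact ⟨"walmart".toList, "com".toList, by decide, by decide, by decide⟩
  · exact ⟨"target".toList, "com".toList, by decide, by decide, by decide⟩
  · exact ⟨"chewy".toList, "com".toList, by decide, by decide, by decide⟩
  · exact ⟨"petco".toList, "com".toList, by decide, by decide, by decide⟩
  · exact ⟨"petsmart".toList, "com".toList, by decide, by decide, by decide⟩
  · exact ⟨"tractorsupply".toList, "com".toList, by decide, by decide, by decide⟩
  · exact ⟨"homedepot".toList, "com".toList, by decide, by decide, by decide⟩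
  · exact ⟨"lowes".toList, "com".toList, by decide, by decide, by decide⟩
  · exact ⟨"acehardware".toList, "com".toList, by decide, by decide, by decide⟩
  · exact ⟨"costco".toList, "com".toList, by decide, by decide, by decide⟩
  · exact ⟨"summitracing".toList, "com".toList, by decide, by decide, by decide⟩
  · exact ⟨"ebay".toList, "com".toList, by decide, by decide, by decide⟩

-- port A as a bounded existential over the retailer list, on the List Char side
lemma pvA_iff (domain : String) : is_major_retailer_domain domain = true ↔
    ∃ r ∈ pvRetailersA,
      (domain.toList = r.toList ∨ ('.' :: r.toList) <:+ domain.toList) := by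
  unfold is_major_retailer_domain
  rw [show PySem.Set.ofList pvRetailersA = pvRetailersA from by decide]
  rw [List.any_eq_true]
  refine exists_congr fun r => and_congr_right fun _ => ?_
  rw [Bool.or_eq_true, beq_iff_eq, PySem.Str.endswith_eq, PySem.Chars.endswith_iff]
  constructor
  · rintro (rfl | hs)
    · exact Or.inl rfl
    · refine Or.inr ?_
      simpa using hs
  · rintro (hl | hs)
    · exact Or.inl (String.toList_inj.mp hl)
    · refine Or.inr ?_
      simpa using hs

-- port B as the same bounded existential
lemma pvB_iff (domain : String) : is_major_retailer_domain_alt domain = true ↔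
    (2 ≤ (domain.toList.splitOn '.').length ∧
     ∃ r ∈ pvRetailersA,
       PySem.Chars.join ['.'] ((domain.toList.splitOn '.').drop
         ((domain.toList.splitOn '.').length - 2)) = r.toList) := by
  unfold is_major_retailer_domain_alt
  simp only [pvSplitOnSingle]
  rw [PySem.List.slice_from_neg_ofNat _ 2 (by norm_num)]
  by_cases h : (domain.toList.splitOn '.').length < 2
  · simp only [if_pos h]
    constructor
    · intro hfalse; exact absurd hfalse (by simp)
    · rintro ⟨hn, -⟩; omega
  · rw [if_neg h]
    rw [PySem.Set.contains_iff, pvRetailersB, PySem.Set.mem_ofList]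
    constructor
    · intro hm
      exact ⟨by omega, String.ofList _, hm, by simp⟩
    · rintro ⟨-, r, hr, hj⟩
      have : String.ofList (PySem.Chars.join ['.'] ((domain.toList.splitOn '.').drop
          ((domain.toList.splitOn '.').length - 2))) = r := by
        rw [hj]; exact String.toList_inj.mp (by simp)
      rw [this]; exact hr

-- ===== VERDICT (by name: the statement is the Claim_ definition above) =====
theorem is_major_retailer_domain_spec : Claim_equal_is_major_retailer_domain := by
  intro domain _
  show is_major_retailer_domain domain = is_major_retailer_domain_alt domain
  rw [Bool.eq_iff_iff, pvA_iff, pvB_iff]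
  constructor
  · rintro ⟨r, hr, hC⟩
    obtain ⟨x, y, hrl, hx, hy⟩ := pvShape r hr
    rw [hrl] at hC
    have hk := (pvKeyIff _ x y hx hy).mp hC
    exact ⟨hk.1, r, hr, by rw [hrl]; exact hk.2⟩
  · rintro ⟨hn, r, hr, hj⟩
    obtain ⟨x, y, hrl, hx, hy⟩ := pvShape r hr
    refine ⟨r, hr, ?_⟩
    rw [hrl]
    exact (pvKeyIff _ x y hx hy).mpr ⟨hn, by rw [← hrl]; exact hj⟩
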